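-- pv_equiv track=rewrite | github.com/apache/spark | python/pyspark/sql/tests/udf_type_tests/type_table_utils.py | parse_table_content
-- ===== SOURCE A (Python) =====
-- from typing import List, Tuple, Optional
--
-- def parse_table_line(line: str) -> Optional[List[str]]:
--     """Parse a table line and extract cell contents."""
--     if not line.strip() or line.strip().startswith("+"):
--         return None
--
--     cells = [cell.strip() for cell in line.strip("|").split("|")]
--     return cells
--
-- def parse_table_content(content: str) -> Tuple[List[str], List[List[str]]]:
--     """Parse table content and return header and rows."""
--     lines = content.strip().split("\n")
--     header = None
--     rows = []
--
--     for line in lines: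
--         cells = parse_table_line(line)
--         if cells is not None:
--             if header is None:
--                 header = cells
--             else:
--                 rows.append(cells)
--
--     return header, rows
-- ===== SOURCE B (Python) =====
-- from typing import List, Tuple
--
--
-- def _is_row(line: str) -> bool:
--     """A line that actually carries cells: non-blank and not a '+---+' border."""
--     s = line.strip()
--     return bool(s) and not s.startswith("+")
--
--
-- def _cells(line: str) -> List[str]:
--     """Split a row line into its stripped cells."""
--     return [cell.strip() for cell in line.strip("|").split("|")]
--
--
-- def parse_table_content(content: str) -> Tuple[List[str], List[List[str]]]:
--     """Recursively peel off leading non-row lines; the first row line is the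
--     header, the rest is one comprehension over the remaining row lines."""
--     return _parse(content.strip().split("\n"))
--
--
-- def _parse(lines: List[str]) -> Tuple[List[str], List[List[str]]]:
--     if not lines:
--         return None, []
--     first, rest = lines[0], lines[1:]
--     if not _is_row(first):
--         return _parse(rest)
--     return _cells(first), [_cells(l) for l in rest if _is_row(l)]
-- ===== Notes on version B (the rewrite author's own statement) =====
-- stated objective: simpler
-- what changed: B drops the Optional-returning helper and the header-is-None state entirely: validity testing (_is_row) and cell extraction (_cells) become separate helpers, and a recursive _parse peels leading non-row lines until the header line, after which the rows are a single filter-and-map comprehension over the remaining lines.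
-- outside the precondition, e.g. on parse_table_content(''): A returns (None, []), B returns (None, []); on parse_table_content('+---+'): A returns (None, []), B returns (None, [])
import Mathlib
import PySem

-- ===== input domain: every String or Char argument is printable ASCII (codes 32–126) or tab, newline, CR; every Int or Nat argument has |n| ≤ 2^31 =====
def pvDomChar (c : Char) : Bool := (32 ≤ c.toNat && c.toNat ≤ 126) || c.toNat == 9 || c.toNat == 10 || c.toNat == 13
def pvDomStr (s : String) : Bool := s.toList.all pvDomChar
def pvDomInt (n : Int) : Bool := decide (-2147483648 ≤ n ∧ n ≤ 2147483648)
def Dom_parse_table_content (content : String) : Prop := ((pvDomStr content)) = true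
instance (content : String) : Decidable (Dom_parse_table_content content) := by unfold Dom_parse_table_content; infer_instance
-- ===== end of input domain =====

-- B drops the Optional helper and the header-is-None state: a recursive peel of leading non-row lines, then one filter-and-map for the rows (simpler decomposition, same cost).


-- s.split("\n"): PySem.Str.split? is none only for the empty separator, so .getD [] is exact here
def pvSplitNL (s : String) : List String := (PySem.Str.split? s "\n").getD []

-- ===== PORT A =====
-- A's helper parse_table_line (returns Optional)
def parse_table_line (line : String) : Option (List String) :=
  if PySem.Str.strip line = "" || PySem.Str.startswith (PySem.Str.strip line) "+" then
    none
  else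
    some (((PySem.Str.split? (PySem.Str.stripChars line "|") "|").getD []).map PySem.Str.strip)

-- A's loop: state (header, rows); the final `none` header (no valid line, Python returns None) is outside Pre_
def pvLoopA : List String → Option (List String) → List (List String) → List String × List (List String)
  | [], header, rows => (header.getD [], rows)
  | l :: ls, header, rows =>
    match parse_table_line l with
    | none => pvLoopA ls header rows
    | some cells =>
      match header with
      | none => pvLoopA ls (some cells) rows
      | some _ => pvLoopA ls header (rows ++ [cells])

def parse_table_content (content : String) : List String × List (List String) :=
  pvLoopA (pvSplitNL (PySem.Str.strip content)) none []

-- ===== PORT B =====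
-- Source B's _is_row: non-blank and not a '+' border
def pvIsRow (line : String) : Bool :=
  !(PySem.Str.strip line == "") && !(PySem.Str.startswith (PySem.Str.strip line) "+")

-- Source B's _cells
def pvCells (line : String) : List String :=
  ((PySem.Str.split? (PySem.Str.stripChars line "|") "|").getD []).map PySem.Str.strip

-- Source B's _parse: peel leading non-row lines; header = first row line, rows = filter+map over the rest
-- (the empty/no-row case, Python's (None, []), is outside Pre_)
def pvParse : List String → List String × List (List String)
  | [] => ([], [])
  | first :: rest =>
    if pvIsRow first then (pvCells first, (rest.filter pvIsRow).map pvCells)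
    else pvParse rest

def parse_table_content_alt (content : String) : List String × List (List String) :=
  pvParse (pvSplitNL (PySem.Str.strip content))

-- ===== PRECONDITION & SPEC =====
-- Pre_ excludes inputs with no valid table line (all lines blank or starting with '+'):
-- there Python A (and B) return (None, []), whose header is not a value of the declared List[str] type.
def Pre_parse_table_content (content : String) : Prop :=
  ((pvSplitNL (PySem.Str.strip content)).any
    (fun l => !(PySem.Str.strip l == "" || PySem.Str.startswith (PySem.Str.strip l) "+"))) = true
instance (content : String) : Decidable (Pre_parse_table_content content) := by
  unfold Pre_parse_table_content; infer_instance

def pvWitness_parse_table_content : String := "| a | b |\n+---+\n| 1 | 2 |"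

def Spec_parse_table_content (content : String) (out : List String × List (List String)) : Prop := out = parse_table_content_alt content
instance (content : String) (out : List String × List (List String)) : Decidable (Spec_parse_table_content content out) := by unfold Spec_parse_table_content; infer_instance

-- ===== CLAIM (what is proved, stated in full; the proofs are below) =====
def Claim_equal_parse_table_content : Prop := ∀ (content : String), Dom_parse_table_content content → Pre_parse_table_content content → Spec_parse_table_content content (parse_table_content content)

-- ===== LEMMAS AND PROOFS =====

-- A's helper is none exactly when B's predicate rejects, and some (pvCells l) otherwise
theorem parse_table_line_eq (l : String) :
    parse_table_line l = if pvIsRow l then some (pvCells l) else none := by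
  simp only [parse_table_line, pvIsRow, pvCells]
  by_cases h1 : PySem.Str.strip l = ""
  · simp [h1]
  · cases h2 : PySem.Chars.startswith (PySem.Chars.strip l.toList) ['+'] <;>
      simp [h1, h2]

-- filterMap over A's helper = filter by B's predicate then map B's cells
theorem filterMap_eq_filter_map (ls : List String) :
    (ls.filterMap fun x => if pvIsRow x then some (pvCells x) else none)
      = (ls.filter pvIsRow).map pvCells := by
  induction ls with
  | nil => rfl
  | cons l ls ih =>
    by_cases h : pvIsRow l = true <;>
      simp [h, ih]

-- once the header is fixed, A's loop appends exactly the remaining parsed lines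
theorem pvLoopA_some (ls : List String) (h : List String) (rows : List (List String)) :
    pvLoopA ls (some h) rows = (h, rows ++ ls.filterMap parse_table_line) := by
  induction ls generalizing rows with
  | nil => simp [pvLoopA]
  | cons l ls ih =>
    cases hl : parse_table_line l with
    | none => simp [pvLoopA, hl, ih]
    | some cells => simp [pvLoopA, hl, ih]

-- A's whole loop computes B's recursion
theorem pvLoopA_eq_pvParse (ls : List String) :
    pvLoopA ls none [] = pvParse ls := by
  induction ls with
  | nil => simp [pvLoopA, pvParse]
  | cons l ls ih =>
    by_cases h : pvIsRow l = true
    · simp [pvLoopA, parse_table_line_eq, h, pvParse, pvLoopA_some,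
        filterMap_eq_filter_map]
    · simp [pvLoopA, parse_table_line_eq, h, pvParse, ih]

-- ===== VERDICT (by name: the statement is the Claim_ definition above) =====
theorem parse_table_content_spec : Claim_equal_parse_table_content := by
  intro content _ _
  unfold Spec_parse_table_content parse_table_content parse_table_content_alt
  exact pvLoopA_eq_pvParse _
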